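-- pv_equiv track=rewrite | github.com/RascalTwo/DailyProblem | problems/DailyCoding/246/solve.py | solve
-- ===== SOURCE A (Python) =====
-- from typing import List, Optional
--
-- def solve(words: List[str]) -> Optional[List[str]]:
-- 	return (
-- 		words
-- 		if len(words) == 1 else
-- 		next((
-- 			[words[0]] + circle
-- 			for i, word in enumerate(words[1:])
-- 			if words[0].endswith(word[0]) and
-- 			(circle := solve(
-- 				[word] + [
-- 					loop_word
-- 					for li, loop_word in enumerate(words[1:])
-- 					if li != i
-- 				])
-- 			)
-- 		), None)
-- 	)
-- ===== SOURCE B (Python) =====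
-- from typing import List, Optional
--
-- def solve(words: List[str]) -> Optional[List[str]]:
--     # Iterative DFS with an explicit stack instead of recursion.
--     if not words:
--         return None
--     stack = [([words[0]], words[1:])]
--     while stack:
--         path, remaining = stack.pop()
--         if not remaining:
--             return path
--         last = path[-1]
--         # push candidates in reverse index order so the earliest match is explored first
--         for i in range(len(remaining) - 1, -1, -1):
--             w = remaining[i]
--             if last[-1:] == w[:1]:
--                 stack.append((path + [w], remaining[:i] + remaining[i + 1:]))
--     return None
-- ===== Notes on version B (the rewrite author's own statement) =====
-- stated objective: alternative
-- what changed: Replaces A's recursive generator-with-walrus DFS by an explicit iterative DFS over a stack of (path, remaining) states, pushing matching candidates in reverse index order so A's first-found chain and tie-breaking are preserved.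
import Mathlib
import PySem

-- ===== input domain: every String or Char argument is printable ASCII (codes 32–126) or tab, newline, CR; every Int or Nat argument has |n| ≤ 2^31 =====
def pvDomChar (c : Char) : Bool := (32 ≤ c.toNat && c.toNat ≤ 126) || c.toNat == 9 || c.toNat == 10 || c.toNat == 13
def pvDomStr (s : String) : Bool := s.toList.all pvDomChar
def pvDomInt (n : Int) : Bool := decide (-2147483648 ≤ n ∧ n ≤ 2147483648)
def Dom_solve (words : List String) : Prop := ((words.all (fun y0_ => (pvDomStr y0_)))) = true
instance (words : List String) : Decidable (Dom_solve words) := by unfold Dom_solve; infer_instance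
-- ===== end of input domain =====

-- B replaces A's recursive generator-based DFS by an explicit iterative stack of
-- (path, remaining) states (same first-found chain); proved equal on Pre_ (no empty
-- word in the tail, where A raises IndexError).

-- ===== PORT A =====
-- the inner generator loop of A: iterate over enumerate(words[1:]); 'recur' is the recursive call
def solveA_scan (recur : List String → Option (List String)) (hd : String) (tail : List String) : List (Int × String) → Option (List String)
  | [] => none
  | (i, word) :: rest =>
    match word.toList.head? with
    | none => none   -- word[0] on an empty word: Python raises IndexError here (excluded by Pre_)
    | some c =>
      if PySem.Str.endswith hd (String.ofList [c]) then
        match recur (word :: tail.eraseIdx i.toNat) with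
        | some circle => if circle = [] then solveA_scan recur hd tail rest else some (hd :: circle)
        | none => solveA_scan recur hd tail rest
      else solveA_scan recur hd tail rest

-- fuel = words.length suffices: each recursive call's list is one word shorter
def solveA_go : Nat → List String → Option (List String)
  | fuel, words =>
    if words.length = 1 then some words
    else match fuel with
    | 0 => none
    | f+1 => solveA_scan (fun ws => solveA_go f ws) (words.headD "") words.tail (PySem.List.enumerate words.tail 0)

def solve (words : List String) : Option (List String) := solveA_go words.length words

-- ===== PORT B =====
-- last[-1:] == w[:1]  (string comparison, ported on the character lists)
def solveB_cond (last w : String) : Bool :=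
  PySem.List.slice last.toList (some (-1)) none == PySem.List.slice w.toList none (some 1)

-- the states pushed for one popped state, in the order they end up on top of the stack
-- (Python pushes in reverse index order onto the list end; head = top here)
def solveB_children (path rem : List String) : List (List String × List String) :=
  (PySem.List.enumerate rem 0).filterMap (fun p =>
    if solveB_cond (path.getLastD "") p.2 then some (path ++ [p.2], rem.eraseIdx p.1.toNat) else none)

-- the while loop; fuel only totalises it (each iteration strictly decreases the
-- measure Σ (remaining.length+1)! over the stack, which starts at (n+1)!)
def solveB_loop : Nat → List (List String × List String) → Option (List String)
  | _, [] => none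
  | 0, _ :: _ => none
  | f+1, (path, rem) :: rest =>
    if rem = [] then some path
    else solveB_loop f (solveB_children path rem ++ rest)

def solve_alt (words : List String) : Option (List String) :=
  match words with
  | [] => none
  | w :: ws => solveB_loop ((ws.length + 1).factorial) [([w], ws)]

-- ===== PRECONDITION & SPEC =====
-- Pre_ excludes an empty word among words[1:]: there A evaluates ''[0] and raises IndexError.
def Pre_solve (words : List String) : Prop := "" ∉ words.tail
instance (words : List String) : Decidable (Pre_solve words) := by unfold Pre_solve; infer_instance
def pvWitness_solve : List String := (["ab", "bc"])


def Spec_solve (words : List String) (out : Option (List String)) : Prop := out = solve_alt words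
instance (words : List String) (out : Option (List String)) : Decidable (Spec_solve words out) := by unfold Spec_solve; infer_instance

-- ===== CLAIM (what is proved, stated in full; the proofs are below) =====
def Claim_equal_solve : Prop := ∀ (words : List String), Dom_solve words → Pre_solve words → Spec_solve words (solve words)

-- ===== LEMMAS AND PROOFS =====

-- membership facts for PySem.List.enumerate
lemma pv_mem_enumerate {α : Type} (xs : List α) (s : Int) (p : Int × α)
    (h : p ∈ PySem.List.enumerate xs s) : s ≤ p.1 ∧ p.1 < s + xs.length ∧ p.2 ∈ xs := by
  induction xs generalizing s with
  | nil => simp [PySem.List.enumerate_nil] at h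
  | cons x xs ih =>
    rw [PySem.List.enumerate_cons] at h
    rcases List.mem_cons.mp h with h | h
    · subst h
      refine ⟨le_refl _, by simp only [List.length_cons]; push_cast; omega, List.mem_cons_self⟩
    · obtain ⟨h1, h2, h3⟩ := ih (s + 1) h
      refine ⟨by omega, by simp; omega, List.mem_cons_of_mem _ h3⟩

-- the termination measure of the stack
def pvMeasure (st : List (List String × List String)) : Nat :=
  (st.map (fun s => (s.2.length + 1).factorial)).sum

@[simp] lemma pvMeasure_nil : pvMeasure [] = 0 := rfl
@[simp] lemma pvMeasure_cons (s : List String × List String) (st : List (List String × List String)) :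
    pvMeasure (s :: st) = (s.2.length + 1).factorial + pvMeasure st := by
  simp [pvMeasure]
@[simp] lemma pvMeasure_append (a b : List (List String × List String)) :
    pvMeasure (a ++ b) = pvMeasure a + pvMeasure b := by
  simp [pvMeasure]

lemma pv_children_lt (path rem : List String) (h : rem ≠ []) :
    pvMeasure (solveB_children path rem) < (rem.length + 1).factorial := by
  have hr1 : 1 ≤ rem.length := by cases rem with | nil => exact absurd rfl h | cons a t => simp
  have hlen : (solveB_children path rem).length ≤ rem.length := by
    unfold solveB_children
    calc (List.filterMap _ _).length ≤ (PySem.List.enumerate rem 0).length :=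
          List.length_filterMap_le _ _
      _ = rem.length := by rw [PySem.List.length_enumerate]
  have hall : ∀ x ∈ (solveB_children path rem).map (fun s => (s.2.length + 1).factorial),
      x ≤ rem.length.factorial := by
    intro x hx
    obtain ⟨s, hs, rfl⟩ := List.mem_map.mp hx
    unfold solveB_children at hs
    obtain ⟨p, hp, hg⟩ := List.mem_filterMap.mp hs
    obtain ⟨h1, h2, _⟩ := pv_mem_enumerate rem 0 p hp
    split at hg
    · injection hg with hg; subst hg
      rw [List.length_eraseIdx_of_lt (by omega : p.1.toNat < rem.length)]
      have he : rem.length - 1 + 1 = rem.length := by omega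
      rw [he]
    · cases hg
  calc pvMeasure (solveB_children path rem)
      ≤ ((solveB_children path rem).map (fun s => (s.2.length + 1).factorial)).length
          * rem.length.factorial := by
        refine le_trans (le_of_eq rfl) ?_
        calc ((solveB_children path rem).map (fun s => (s.2.length + 1).factorial)).sum
            ≤ ((solveB_children path rem).map (fun s => (s.2.length + 1).factorial)).length
                • rem.length.factorial := List.sum_le_card_nsmul _ _ hall
          _ = _ := by simp
    _ ≤ rem.length * rem.length.factorial := by
        simp only [List.length_map]; exact Nat.mul_le_mul_right _ hlen
    _ < (rem.length + 1).factorial := by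
        rw [Nat.factorial_succ]
        exact (Nat.mul_lt_mul_right rem.length.factorial_pos).mpr (by omega)

-- the loop's result does not depend on the fuel once the fuel covers the measure
lemma pv_loop_fuel (f : Nat) : ∀ (g : Nat) (st : List (List String × List String)),
    pvMeasure st ≤ f → pvMeasure st ≤ g → solveB_loop f st = solveB_loop g st := by
  induction f with
  | zero =>
    intro g st h1 _
    cases st with
    | nil => cases g <;> rfl
    | cons s rest =>
      exfalso
      simp only [pvMeasure_cons] at h1
      have := (s.2.length + 1).factorial_pos
      omega
  | succ f ihf =>
    intro g st h1 h2
    cases st with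
    | nil => cases g <;> rfl
    | cons s rest =>
      obtain ⟨p, r⟩ := s
      have hpos : 1 ≤ pvMeasure ((p, r) :: rest) := by
        simp only [pvMeasure_cons]
        have := (r.length + 1).factorial_pos
        omega
      cases g with
      | zero => omega
      | succ g =>
        by_cases hr : r = []
        · subst hr; simp [solveB_loop]
        · simp only [solveB_loop, if_neg hr]
          have hlt : pvMeasure (solveB_children p r ++ rest) < pvMeasure ((p, r) :: rest) := by
            simp only [pvMeasure_append, pvMeasure_cons]
            have := pv_children_lt p r hr
            omega
          exact ihf g _ (by omega) (by omega)

-- splitting the stack: the loop finds the first success, state by state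
lemma pv_loop_append (f : Nat) : ∀ (l1 l2 : List (List String × List String)),
    pvMeasure (l1 ++ l2) ≤ f →
    solveB_loop f (l1 ++ l2) = (solveB_loop f l1).or (solveB_loop f l2) := by
  induction f with
  | zero =>
    intro l1 l2 h
    cases l1 with
    | nil => cases l2 <;> rfl
    | cons s rest =>
      exfalso
      simp only [List.cons_append, pvMeasure_cons, pvMeasure_append] at h
      have := (s.2.length + 1).factorial_pos
      omega
  | succ f ihf =>
    intro l1 l2 h
    cases l1 with
    | nil => simp [solveB_loop, Option.none_or]
    | cons s rest =>
      obtain ⟨p, r⟩ := s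
      by_cases hr : r = []
      · subst hr; simp only [List.cons_append, solveB_loop, if_pos]; rfl
      · have hfac : 2 ≤ (r.length + 1).factorial := by
          have h1 : 1 ≤ r.length := by cases r with | nil => exact absurd rfl hr | cons a t => simp
          calc 2 = (1 + 1).factorial := rfl
            _ ≤ (r.length + 1).factorial := Nat.factorial_le (by omega)
        have hch := pv_children_lt p r hr
        simp only [List.cons_append, pvMeasure_cons, pvMeasure_append] at h
        simp only [List.cons_append, solveB_loop, if_neg hr]
        rw [← List.append_assoc]
        rw [ihf (solveB_children p r ++ rest) l2 (by simp only [pvMeasure_append]; omega)]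
        congr 1
        exact pv_loop_fuel f (f + 1) l2 (by omega) (by omega)

-- A's inner loop yields none or hd :: _
lemma pv_scan_shape (recur : List String → Option (List String)) (hd : String) (tail : List String) :
    ∀ cands, solveA_scan recur hd tail cands = none ∨
      ∃ c, solveA_scan recur hd tail cands = some (hd :: c) := by
  intro cands
  induction cands with
  | nil => exact Or.inl rfl
  | cons p rest ih =>
    obtain ⟨i, word⟩ := p
    rcases hw : word.toList.head? with _ | c
    · simp only [solveA_scan, hw]
      exact Or.inl (by simp)
    · simp only [solveA_scan, hw]
      split
      · rcases hr : recur (word :: tail.eraseIdx i.toNat) with _ | circle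
        · exact ih
        · by_cases hc : circle = []
          · simp only [if_pos hc]; exact ih
          · simp only [if_neg hc]; exact Or.inr ⟨circle, rfl⟩
      · exact ih

lemma pv_go_nonempty (f : Nat) (w : String) (rem l : List String)
    (h : solveA_go f (w :: rem) = some l) : l ≠ [] := by
  cases f with
  | zero =>
    replace h : (if (w :: rem).length = 1 then some (w :: rem) else none) = some l := h
    by_cases hl : (w :: rem).length = 1
    · rw [if_pos hl] at h; injection h with h; subst h; simp
    · rw [if_neg hl] at h; simp at h
  | succ f =>
    replace h : (if (w :: rem).length = 1 then some (w :: rem)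
        else solveA_scan (fun ws => solveA_go f ws) ((w :: rem).headD "") (w :: rem).tail
          (PySem.List.enumerate (w :: rem).tail 0)) = some l := h
    by_cases hl : (w :: rem).length = 1
    · rw [if_pos hl] at h; injection h with h; subst h; simp
    · rw [if_neg hl] at h
      rcases pv_scan_shape (fun ws => solveA_go f ws) ((w :: rem).headD "") (w :: rem).tail
          (PySem.List.enumerate (w :: rem).tail 0) with hn | ⟨c, hc⟩
      · rw [hn] at h; cases h
      · rw [hc] at h; injection h with h; subst h; simp

-- the two candidate tests agree on nonempty words
lemma pv_cond_eq (w x : String) (c : Char) (hx : x.toList.head? = some c) :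
    solveB_cond w x = PySem.Str.endswith w (String.ofList [c]) := by
  unfold solveB_cond
  rw [PySem.List.slice_from_neg_one, PySem.List.slice_to (xs := x.toList) (show (0:Int) ≤ 1 by norm_num)]
  have hx1 : x.toList.take (1:Int).toNat = [c] := by
    cases hxl : x.toList with
    | nil => rw [hxl] at hx; cases hx
    | cons a t => rw [hxl] at hx; injection hx with hx; subst hx; rfl
  rw [hx1, PySem.Str.endswith_eq]
  by_cases hsuf : PySem.Chars.endswith w.toList (String.ofList [c]).toList = true
  · rw [hsuf]
    have hsufl : [c] <:+ w.toList := by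
      have := (PySem.Chars.endswith_iff _ _).mp hsuf
      simpa using this
    obtain ⟨t, ht⟩ := hsufl
    rw [← ht]
    simp [List.length_append]
  · rw [Bool.eq_false_iff.mpr hsuf, beq_eq_false_iff_ne]
    intro hdrop
    apply hsuf
    rw [PySem.Chars.endswith_iff]
    have : w.toList.drop (w.toList.length - 1) <:+ w.toList := List.drop_suffix _ _
    rw [hdrop] at this
    simpa using this

-- inner loop correspondence, one candidate list at a time
lemma pv_scan_loop (rem : List String) (f' : Nat) (w : String) (path : List String)
    (IH : ∀ (i : Nat) (x : String), i < rem.length → x ∈ rem → ∀ fuel,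
      pvMeasure [((path ++ [w]) ++ [x], rem.eraseIdx i)] ≤ fuel →
      solveB_loop fuel [((path ++ [w]) ++ [x], rem.eraseIdx i)] =
        (solveA_go f' (x :: rem.eraseIdx i)).map (fun l => (path ++ [w]) ++ l))
    (hne : ∀ x ∈ rem, x ≠ "") :
    ∀ (cands : List (Int × String)), (∀ p ∈ cands, 0 ≤ p.1 ∧ p.1.toNat < rem.length ∧ p.2 ∈ rem) →
    ∀ fuel,
      pvMeasure (List.filterMap (fun p =>
        if solveB_cond w p.2 then some ((path ++ [w]) ++ [p.2], rem.eraseIdx p.1.toNat) else none) cands) ≤ fuel →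
      solveB_loop fuel (List.filterMap (fun p =>
        if solveB_cond w p.2 then some ((path ++ [w]) ++ [p.2], rem.eraseIdx p.1.toNat) else none) cands) =
        (solveA_scan (fun ws => solveA_go f' ws) w rem cands).map (fun l => path ++ l) := by
  intro cands
  induction cands with
  | nil =>
    intro _ fuel _
    cases fuel <;> simp [solveA_scan, solveB_loop]
  | cons p rest ihc =>
    intro hinv fuel hfuel
    obtain ⟨i, x⟩ := p
    obtain ⟨hi0, hilt, hxmem⟩ := hinv (i, x) List.mem_cons_self
    have hx : x ≠ "" := hne x hxmem
    have hxl : x.toList ≠ [] := fun hc => hx (String.toList_eq_nil_iff.mp hc)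
    rcases hhead : x.toList.head? with _ | c
    · exact absurd (List.head?_eq_none_iff.mp hhead) hxl
    · have hcond := pv_cond_eq w x c hhead
      simp only [solveA_scan, hhead, List.filterMap_cons]
      by_cases hA : PySem.Str.endswith w (String.ofList [c]) = true
      · simp only [hcond, hA, if_true]
        simp only [List.filterMap_cons, hcond, hA, if_true] at hfuel
        simp only [pvMeasure_cons] at hfuel
        rw [← List.singleton_append]
        rw [pv_loop_append fuel _ _ (by simp only [pvMeasure_append, pvMeasure_cons, pvMeasure_nil]; omega)]
        rw [IH i.toNat x hilt hxmem fuel (by simp only [pvMeasure_cons, pvMeasure_nil]; omega)]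
        rcases hgo : solveA_go f' (x :: rem.eraseIdx i.toNat) with _ | circle
        · simp only [Option.map_none, Option.none_or]
          exact ihc (fun q hq => hinv q (List.mem_cons_of_mem _ hq)) fuel (by omega)
        · have hnil : circle ≠ [] := pv_go_nonempty f' x _ circle hgo
          simp only [Option.map_some, Option.some_or, if_neg hnil]
          simp [List.append_assoc]
      · simp only [Bool.not_eq_true] at hA
        simp only [hcond, hA, Bool.false_eq_true, if_false]
        simp only [List.filterMap_cons, hcond, hA, Bool.false_eq_true, if_false] at hfuel
        exact ihc (fun q hq => hinv q (List.mem_cons_of_mem _ hq)) fuel hfuel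

-- the base state: remaining empty on both sides
lemma pv_main_nil (f : Nat) (w : String) (path : List String) (fuel : Nat) (hfuel : 1 ≤ fuel) :
    solveB_loop fuel [(path ++ [w], ([] : List String))] =
      (solveA_go f (w :: ([] : List String))).map (fun l => path ++ l) := by
  cases fuel with
  | zero => omega
  | succ fu =>
    have hA : solveA_go f [w] = some [w] := by cases f <;> rfl
    simp [solveB_loop, hA]

-- main correspondence: one stack state vs one recursive call of A
lemma pv_main (n : Nat) : ∀ (rem : List String), rem.length ≤ n → (∀ x ∈ rem, x ≠ "") →
    ∀ (f : Nat), rem.length ≤ f → ∀ (w : String) (path : List String) (fuel : Nat),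
    pvMeasure [(path ++ [w], rem)] ≤ fuel →
    solveB_loop fuel [(path ++ [w], rem)] = (solveA_go f (w :: rem)).map (fun l => path ++ l) := by
  induction n with
  | zero =>
    intro rem hlen _ f _ w path fuel hfuel
    obtain rfl : rem = [] := List.length_eq_zero_iff.mp (by omega)
    exact pv_main_nil f w path fuel (by simp [pvMeasure_cons] at hfuel; omega)
  | succ n ihn =>
    intro rem hlen hne f hf w path fuel hfuel
    cases rem with
    | nil => exact pv_main_nil f w path fuel (by simp [pvMeasure_cons] at hfuel; omega)
    | cons y t =>
      cases f with
      | zero => simp at hf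
      | succ f' =>
        cases fuel with
        | zero =>
          exfalso
          simp only [pvMeasure_cons, pvMeasure_nil] at hfuel
          have := ((y :: t).length + 1).factorial_pos
          omega
        | succ fu =>
          have hA : solveA_go (f' + 1) (w :: y :: t) =
              solveA_scan (fun ws => solveA_go f' ws) w (y :: t) (PySem.List.enumerate (y :: t) 0) := by
            show (if (w :: y :: t).length = 1 then some (w :: y :: t)
              else solveA_scan (fun ws => solveA_go f' ws) ((w :: y :: t).headD "") (w :: y :: t).tail
                (PySem.List.enumerate (w :: y :: t).tail 0)) = _
            rw [if_neg (by simp)]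
            rfl
          have hB : solveB_loop (fu + 1) [(path ++ [w], y :: t)] =
              solveB_loop fu (solveB_children (path ++ [w]) (y :: t) ++ []) := by
            simp only [solveB_loop]
            rw [if_neg (by simp)]
          have hchild : solveB_children (path ++ [w]) (y :: t) =
              List.filterMap (fun p => if solveB_cond w p.2 then
                some ((path ++ [w]) ++ [p.2], (y :: t).eraseIdx p.1.toNat) else none)
                (PySem.List.enumerate (y :: t) 0) := by
            unfold solveB_children
            rw [List.getLastD_concat]
          have hmu : pvMeasure (solveB_children (path ++ [w]) (y :: t)) ≤ fu := by
            have := pv_children_lt (path ++ [w]) (y :: t) (by simp)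
            simp only [pvMeasure_cons, pvMeasure_nil] at hfuel
            omega
          rw [hA, hB, List.append_nil, hchild]
          refine pv_scan_loop (y :: t) f' w path ?_ hne (PySem.List.enumerate (y :: t) 0) ?_ fu ?_
          · intro i x hi hx fuel' hf'
            refine ihn ((y :: t).eraseIdx i) ?_ (fun z hz => hne z (List.mem_of_mem_eraseIdx hz)) f' ?_ x (path ++ [w]) fuel' hf'
            · rw [List.length_eraseIdx_of_lt hi]
              simp only [List.length_cons] at hlen ⊢
              omega
            · rw [List.length_eraseIdx_of_lt hi]
              simp only [List.length_cons] at hf ⊢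
              omega
          · intro q hq
            obtain ⟨h1, h2, h3⟩ := pv_mem_enumerate _ 0 q hq
            exact ⟨h1, by omega, h3⟩
          · rw [← hchild]
            exact hmu

-- ===== VERDICT (by name: the statement is the Claim_ definition above) =====
theorem solve_spec : Claim_equal_solve := by
  unfold Claim_equal_solve
  intro words _ hpre
  unfold Spec_solve
  cases words with
  | nil => rfl
  | cons w ws =>
    unfold Pre_solve at hpre
    simp only [List.tail_cons] at hpre
    have hne : ∀ x ∈ ws, x ≠ "" := fun x hx he => hpre (he ▸ hx)
    have h := pv_main ws.length ws le_rfl hne (ws.length + 1) (by omega) w []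
      ((ws.length + 1).factorial) (by simp [pvMeasure])
    simp at h
    exact h.symm
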